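-- pv_equiv track=rewrite | github.com/miliar/Code_Jam_Webscraper | solutions_python/Problem_96/644.py | calculate_triplet
-- ===== SOURCE A (Python) =====
-- def calculate_triplet(total_score, is_surprise):
--     max = 11
--     min_offset = 1
--
--     if is_surprise:
--         min_offset = 2
--
--     is_valid = False
--
--     while max > 0 and (not is_valid) :
--         max = max - 1
--         is_valid = is_triplet_valid( total_score - max , max - min_offset)
--         #print "max: " + str(max) + " valid: " + str(is_valid)
--     return max
--
-- def is_triplet_valid(remaining_score, minimum):
--     if minimum < 0:
--         minimum = 0
--
--     return remaining_score >= 2 * minimum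
-- ===== SOURCE B (Python) =====
-- def calculate_triplet(total_score, is_surprise):
--     off = 2 if is_surprise else 1
--     best = min(off, total_score) if total_score >= 0 else 0
--     high = min(10, (total_score + 2 * off) // 3)
--     if high > off:
--         best = high
--     return best
-- ===== Notes on version B (the rewrite author's own statement) =====
-- stated objective: simpler
-- what changed: Replaced A's countdown while-loop over candidates 10..0 with a closed-form arithmetic answer: the max of a low candidate min(off, total_score) (when total_score >= 0) and a high candidate min(10, (total_score + 2*off)//3) (when it exceeds off).
import Mathlib
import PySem

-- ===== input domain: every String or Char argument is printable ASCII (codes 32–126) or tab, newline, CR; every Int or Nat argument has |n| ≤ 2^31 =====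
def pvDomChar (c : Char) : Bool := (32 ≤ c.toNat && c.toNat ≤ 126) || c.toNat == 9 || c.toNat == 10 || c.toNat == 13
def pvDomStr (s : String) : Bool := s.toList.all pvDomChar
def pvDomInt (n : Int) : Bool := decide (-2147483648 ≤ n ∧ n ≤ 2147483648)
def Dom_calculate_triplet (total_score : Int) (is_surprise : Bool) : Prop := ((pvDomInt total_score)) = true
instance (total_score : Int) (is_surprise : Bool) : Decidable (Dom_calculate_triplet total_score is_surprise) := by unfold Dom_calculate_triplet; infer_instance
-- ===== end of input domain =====

-- ===== PORT A =====
-- header: B replaces A's countdown loop by a closed-form arithmetic max of two candidates (objective: simpler).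
def is_triplet_valid (remaining_score : Int) (minimum : Int) : Bool :=
  let minimum := if minimum < 0 then 0 else minimum
  decide (remaining_score ≥ 2 * minimum)

-- the while loop of A, with fuel 12 (the loop body runs at most 11 times)
def calcLoop (total_score : Int) (min_offset : Int) : Nat → Int → Bool → Int
  | 0, mx, _ => mx
  | fuel + 1, mx, is_valid =>
    if mx > 0 && !is_valid then
      calcLoop total_score min_offset fuel (mx - 1)
        (is_triplet_valid (total_score - (mx - 1)) ((mx - 1) - min_offset))
    else mx

def calculate_triplet (total_score : Int) (is_surprise : Bool) : Int :=
  let mx : Int := 11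
  let min_offset : Int := if is_surprise then 2 else 1
  calcLoop total_score min_offset 12 mx false

-- ===== PORT B =====
def calculate_triplet_alt (total_score : Int) (is_surprise : Bool) : Int :=
  let off : Int := if is_surprise then 2 else 1
  let best : Int := if total_score ≥ 0 then min off total_score else 0
  let high : Int := min 10 (PySem.Int.floordiv (total_score + 2 * off) 3)
  if high > off then high else best

-- ===== PRECONDITION & SPEC =====
def Spec_calculate_triplet (total_score : Int) (is_surprise : Bool) (out : Int) : Prop := out = calculate_triplet_alt total_score is_surprise
instance (total_score : Int) (is_surprise : Bool) (out : Int) : Decidable (Spec_calculate_triplet total_score is_surprise out) := by unfold Spec_calculate_triplet; infer_instance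

-- ===== CLAIM (what is proved, stated in full; the proofs are below) =====
def Claim_equal_calculate_triplet : Prop := ∀ (total_score : Int) (is_surprise : Bool), Dom_calculate_triplet total_score is_surprise → Spec_calculate_triplet total_score is_surprise (calculate_triplet total_score is_surprise)

-- ===== LEMMAS AND PROOFS =====

-- ===== VERDICT (by name: the statement is the Claim_ definition above) =====
set_option maxHeartbeats 4000000 in
theorem calculate_triplet_spec : Claim_equal_calculate_triplet := by
  intro total_score is_surprise _
  unfold Spec_calculate_triplet calculate_triplet calculate_triplet_alt
  cases is_surprise <;>
    norm_num [calcLoop, is_triplet_valid, PySem.Int.floordiv_eq_ediv_of_pos (b := 3) (by norm_num),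
      min_def] <;>
    split_ifs <;> omega
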